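-- pv_equiv track=rewrite | github.com/stevealston/launchschool | PY110/small_problems/exercises_easy.py | word_sizes
-- ===== SOURCE A (Python) =====
-- def word_sizes(s):
--     clean_str = ''
--
--     for char in s:
--         if char == ' ' or char.isalpha():
--             clean_str += char
--
--     split = clean_str.split(' ')
--     sizes = {}
--
--     if not s:
--         return sizes
--
--     for word in split:
--         sizes[len(word)] = sizes.get(len(word), 0) + 1
--
--     return sizes
-- ===== SOURCE B (Python) =====
-- def word_sizes(s):
--     if not s:
--         return {}
--     sizes = {}
--     length = 0
--     for char in s:
--         if char == ' ':
--             sizes[length] = sizes.get(length, 0) + 1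
--             length = 0
--         elif char.isalpha():
--             length += 1
--     sizes[length] = sizes.get(length, 0) + 1
--     return sizes
-- ===== Notes on version B (the rewrite author's own statement) =====
-- stated objective: alternative
-- what changed: Replaces A's three phases (build a cleaned copy of the string, split it on spaces into a word list, then count lengths in a dict) with a single fused scan that keeps only an integer run-length counter and records it into the dict at each space and once at the end, allocating no intermediate string or list.
import Mathlib
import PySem

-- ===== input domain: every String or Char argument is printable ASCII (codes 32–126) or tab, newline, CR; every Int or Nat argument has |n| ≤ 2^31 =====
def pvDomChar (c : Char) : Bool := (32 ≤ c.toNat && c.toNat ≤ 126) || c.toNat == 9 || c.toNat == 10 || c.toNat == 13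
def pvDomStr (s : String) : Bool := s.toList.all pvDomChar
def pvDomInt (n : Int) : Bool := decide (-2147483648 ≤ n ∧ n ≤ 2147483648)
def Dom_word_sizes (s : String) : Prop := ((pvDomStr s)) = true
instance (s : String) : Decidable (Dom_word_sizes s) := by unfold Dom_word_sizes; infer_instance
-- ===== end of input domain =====

-- B fuses A's clean / split(" ") / count-lengths phases into one scan carrying a run-length counter (alternative decomposition, same O(n) cost).


-- ===== PORT A =====
def word_sizes (s : String) : List (Int × Int) :=
  let clean : List Char :=
    s.toList.foldl (fun acc c => if c == ' ' || PySem.Chars.isalpha c then acc ++ [c] else acc) []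
  let split := PySem.Chars.splitOn clean [' ']
  let sizes : PySem.Dict Int Int := PySem.Dict.empty
  if s.toList = [] then sizes.items
  else
    (split.foldl
      (fun (d : PySem.Dict Int Int) w =>
        d.insert (w.length : Int) (d.getD (w.length : Int) 0 + 1)) sizes).items

-- ===== PORT B =====
def word_sizes_alt (s : String) : List (Int × Int) :=
  if s.toList = [] then []
  else
    let st :=
      s.toList.foldl
        (fun (p : PySem.Dict Int Int × Int) c =>
          if c == ' ' then (p.1.insert p.2 (p.1.getD p.2 0 + 1), 0)
          else if PySem.Chars.isalpha c then (p.1, p.2 + 1)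
          else p)
        (PySem.Dict.empty, 0)
    (st.1.insert st.2 (st.1.getD st.2 0 + 1)).items

-- ===== PRECONDITION & SPEC =====
def Spec_word_sizes (s : String) (out : List (Int × Int)) : Prop := out = word_sizes_alt s
instance (s : String) (out : List (Int × Int)) : Decidable (Spec_word_sizes s out) := by unfold Spec_word_sizes; infer_instance

-- ===== CLAIM (what is proved, stated in full; the proofs are below) =====
def Claim_equal_word_sizes : Prop := ∀ (s : String), Dom_word_sizes s → Spec_word_sizes s (word_sizes s)

-- ===== LEMMAS AND PROOFS =====

-- reference splitter for a single-space separator: cur is the reversed current piece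
def pvSplit (l : List Char) (cur : List Char) : List (List Char) :=
  match l with
  | [] => [cur.reverse]
  | c :: t => if c = ' ' then cur.reverse :: pvSplit t [] else pvSplit t (c :: cur)

-- piece lengths of a CLEANED list (only spaces and letters); n = length accumulated so far
def pvLens (l : List Char) (n : Int) : List Int :=
  match l with
  | [] => [n]
  | c :: t => if c = ' ' then n :: pvLens t 0 else pvLens t (n + 1)

-- piece lengths read off the RAW string, ignoring non-space non-letter chars
def pvLensRaw (l : List Char) (n : Int) : List Int :=
  match l with
  | [] => [n]
  | c :: t =>
    if c = ' ' then n :: pvLensRaw t 0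
    else if PySem.Chars.isalpha c then pvLensRaw t (n + 1)
    else pvLensRaw t n

-- counting fold shared by both sides
def pvCount (d : PySem.Dict Int Int) (ls : List Int) : PySem.Dict Int Int :=
  ls.foldl (fun d m => d.insert m (d.getD m 0 + 1)) d

-- B's loop step and its end-of-string finalisation, as named functions
def pvStep (p : PySem.Dict Int Int × Int) (c : Char) : PySem.Dict Int Int × Int :=
  if c == ' ' then (p.1.insert p.2 (p.1.getD p.2 0 + 1), 0)
  else if PySem.Chars.isalpha c then (p.1, p.2 + 1)
  else p

def pvFin (p : PySem.Dict Int Int × Int) : PySem.Dict Int Int :=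
  p.1.insert p.2 (p.1.getD p.2 0 + 1)

lemma pvSplit_go (l : List Char) : ∀ (fuel : Nat) (cur : List Char) (acc : List (List Char)),
    l.length ≤ fuel →
    PySem.Chars.splitOn.go [' '] fuel l cur acc = acc.reverse ++ pvSplit l cur := by
  induction l with
  | nil =>
    intro fuel cur acc _
    cases fuel <;> simp [PySem.Chars.splitOn.go, pvSplit]
  | cons c t ih =>
    intro fuel cur acc h
    cases fuel with
    | zero => simp at h
    | succ f =>
      simp only [PySem.Chars.splitOn.go]
      by_cases hc : c = ' '
      · subst hc
        rw [if_pos (by simp [List.isPrefixOf])]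
        simp only [List.length_cons, List.length_nil, List.drop_succ_cons, List.drop_zero]
        rw [ih f [] (cur.reverse :: acc) (by simpa using h)]
        simp [pvSplit]
      · rw [if_neg (by simp [List.isPrefixOf]; intro h'; exact hc h'.symm)]
        rw [ih f (c :: cur) acc (by simpa using h)]
        simp [pvSplit, hc]

lemma pvSplit_eq (l : List Char) :
    PySem.Chars.splitOn l [' '] = pvSplit l [] := by
  have := pvSplit_go l (l.length + 1) [] [] (by omega)
  simpa [PySem.Chars.splitOn] using this

lemma pvSplit_map_len (l : List Char) : ∀ cur : List Char,
    (pvSplit l cur).map (fun w => (w.length : Int)) = pvLens l (cur.length : Int) := by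
  induction l with
  | nil => intro cur; simp [pvSplit, pvLens]
  | cons c t ih =>
    intro cur
    by_cases hc : c = ' '
    · simp [pvSplit, pvLens, hc, ih]
    · have := ih (c :: cur)
      simp only [pvSplit, pvLens, if_neg hc]
      rw [this, show ((List.length (c :: cur) : Int)) = (cur.length : Int) + 1 by simp]

lemma pvLens_filter (l : List Char) : ∀ n : Int,
    pvLens (l.filter (fun c => c == ' ' || PySem.Chars.isalpha c)) n = pvLensRaw l n := by
  induction l with
  | nil => intro n; rfl
  | cons c t ih =>
    intro n
    by_cases hc : c = ' '
    · rw [List.filter_cons, if_pos (by simp [hc])]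
      simp [pvLens, pvLensRaw, hc, ih]
    · cases ha : PySem.Chars.isalpha c
      · rw [List.filter_cons, if_neg (by simp [hc, ha])]
        simp [pvLensRaw, hc, ha, ih]
      · rw [List.filter_cons, if_pos (by simp [ha])]
        simp [pvLens, pvLensRaw, hc, ha, ih]

lemma pvScan_spec (l : List Char) : ∀ (d : PySem.Dict Int Int) (n : Int),
    pvFin (l.foldl pvStep (d, n)) = pvCount d (pvLensRaw l n) := by
  induction l with
  | nil => intro d n; simp [pvFin, pvCount, pvLensRaw]
  | cons c t ih =>
    intro d n
    rw [List.foldl_cons]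
    by_cases hc : c = ' '
    · have hstep : pvStep (d, n) c = (d.insert n (d.getD n 0 + 1), 0) := by
        simp [pvStep, hc]
      rw [hstep, ih]
      simp [pvLensRaw, hc, pvCount]
    · cases ha : PySem.Chars.isalpha c
      · have hstep : pvStep (d, n) c = (d, n) := by simp [pvStep, hc, ha]
        rw [hstep, ih]
        simp [pvLensRaw, hc, ha]
      · have hstep : pvStep (d, n) c = (d, n + 1) := by simp [pvStep, hc, ha]
        rw [hstep, ih]
        simp [pvLensRaw, hc, ha]

-- ===== VERDICT (by name: the statement is the Claim_ definition above) =====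
theorem word_sizes_spec : Claim_equal_word_sizes := by
  intro s _
  unfold Spec_word_sizes word_sizes word_sizes_alt
  by_cases hs : s.toList = []
  · simp [hs, PySem.Dict.empty]
  · simp only [if_neg hs]
    have hclean :
        s.toList.foldl (fun acc c => if c == ' ' || PySem.Chars.isalpha c then acc ++ [c] else acc) []
          = s.toList.filter (fun c => c == ' ' || PySem.Chars.isalpha c) := by
      simpa using PySem.List.foldl_append_if_eq_filter
        (fun c => c == ' ' || PySem.Chars.isalpha c) s.toList []
    rw [hclean, pvSplit_eq]
    have hfold :
        (pvSplit (s.toList.filter (fun c => c == ' ' || PySem.Chars.isalpha c)) []).foldl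
          (fun (d : PySem.Dict Int Int) w =>
            d.insert (w.length : Int) (d.getD (w.length : Int) 0 + 1)) PySem.Dict.empty
          = pvCount PySem.Dict.empty
              ((pvSplit (s.toList.filter (fun c => c == ' ' || PySem.Chars.isalpha c)) []).map
                (fun w => (w.length : Int))) := by
      simp [pvCount, List.foldl_map]
    rw [hfold]
    have hmap := pvSplit_map_len (s.toList.filter (fun c => c == ' ' || PySem.Chars.isalpha c)) []
    rw [hmap, show ((([] : List Char).length : Int)) = 0 by norm_num, pvLens_filter]
    have hscan := pvScan_spec s.toList PySem.Dict.empty 0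
    rw [← hscan]
    rfl
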